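-- pv_equiv track=rewrite | github.com/desmetr/SchakenPython | chesspiece.py | possibleMovesRightDown
-- ===== SOURCE A (Python) =====
-- def possibleMovesRightDown(r, c):
-- 	possibleMoves = []; rowsDone = []; columnsDone = []
-- 	for i in range(r, 8):
-- 		for j in range(c, 8):
-- 			if i not in rowsDone and j not in columnsDone:
-- 					possibleMoves.append((i, j))
-- 					rowsDone.append(i)
-- 					columnsDone.append(j)
--
-- 	if (r,c) in possibleMoves:
-- 		possibleMoves.remove((r,c))
--
-- 	return list(set(possibleMoves))
-- ===== SOURCE B (Python) =====
-- def possibleMovesRightDown(r, c):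
--     n = min(7 - r, 7 - c)
--     return [(r + k, c + k) for k in range(1, n + 1)]
-- ===== Notes on version B (the rewrite author's own statement) =====
-- stated objective: simpler
-- what changed: Replaces the nested row/column scan with rowsDone/columnsDone membership bookkeeping, the remove and the set() dedup by a single comprehension that emits the diagonal squares (r+k, c+k) for k = 1 .. min(7-r, 7-c) directly.
import Mathlib
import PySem

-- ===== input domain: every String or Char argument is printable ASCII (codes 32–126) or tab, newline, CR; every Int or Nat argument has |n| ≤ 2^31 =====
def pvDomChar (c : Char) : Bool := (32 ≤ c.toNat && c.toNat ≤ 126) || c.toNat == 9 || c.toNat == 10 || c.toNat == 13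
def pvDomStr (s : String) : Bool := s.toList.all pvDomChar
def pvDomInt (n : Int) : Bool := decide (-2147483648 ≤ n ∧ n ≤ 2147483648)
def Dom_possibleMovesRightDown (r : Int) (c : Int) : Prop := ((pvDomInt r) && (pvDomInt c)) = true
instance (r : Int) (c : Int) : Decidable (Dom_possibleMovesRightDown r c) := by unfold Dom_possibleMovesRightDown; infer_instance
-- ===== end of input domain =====

-- B replaces A's nested row/column scan with bookkeeping lists by a single pass emitting the diagonal directly.


-- ===== PORT A =====
-- state of A's loops: (possibleMoves, rowsDone, columnsDone)
abbrev PvSt := List (Int × Int) × List Int × List Int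

-- body of A's inner loop over j, for the current row i
def pvStep (i : Int) (st : PvSt) (j : Int) : PvSt :=
  if i ∉ st.2.1 ∧ j ∉ st.2.2 then
    (st.1 ++ [(i, j)], st.2.1 ++ [i], st.2.2 ++ [j])
  else st

def possibleMovesRightDown (r : Int) (c : Int) : List (Int × Int) :=
  let st := (PySem.List.pyRange r 8 1).foldl
      (fun st i => (PySem.List.pyRange c 8 1).foldl (pvStep i) st)
      (([] : List (Int × Int)), ([] : List Int), ([] : List Int))
  let pm := if (r, c) ∈ st.1 then (PySem.List.remove? st.1 (r, c)).getD st.1 else st.1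
  PySem.Set.ofList pm

-- ===== PORT B =====
def possibleMovesRightDown_alt (r : Int) (c : Int) : List (Int × Int) :=
  let n := min (7 - r) (7 - c)
  (PySem.List.pyRange 1 (n + 1) 1).map (fun k => (r + k, c + k))

-- ===== PRECONDITION & SPEC =====
def Spec_possibleMovesRightDown (r : Int) (c : Int) (out : List (Int × Int)) : Prop := out = possibleMovesRightDown_alt r c
instance (r : Int) (c : Int) (out : List (Int × Int)) : Decidable (Spec_possibleMovesRightDown r c out) := by unfold Spec_possibleMovesRightDown; infer_instance

-- ===== CLAIM (what is proved, stated in full; the proofs are below) =====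
def Claim_equal_possibleMovesRightDown : Prop := ∀ (r : Int) (c : Int), Dom_possibleMovesRightDown r c → Spec_possibleMovesRightDown r c (possibleMovesRightDown r c)

-- ===== LEMMAS AND PROOFS =====

-- the diagonal of length t starting at (r, c)
def pvDiag (r c t : Int) : List (Int × Int) :=
  (PySem.List.pyRange 0 t 1).map (fun k => (r + k, c + k))

-- a row already in rowsDone changes nothing
lemma pvStep_done (i : Int) (l : List Int) (st : PvSt) (h : i ∈ st.2.1) :
    l.foldl (pvStep i) st = st := by
  induction l generalizing st with
  | nil => rfl
  | cons j t ih =>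
      have : pvStep i st j = st := by
        simp [pvStep, h]
      rw [List.foldl_cons, this, ih _ h]

-- columns all already in columnsDone change nothing
lemma pvStep_cols (i : Int) (l : List Int) (st : PvSt) (h : ∀ j ∈ l, j ∈ st.2.2) :
    l.foldl (pvStep i) st = st := by
  induction l with
  | nil => rfl
  | cons j t ih =>
      have hj : pvStep i st j = st := by
        simp [pvStep, h j (by simp)]
      rw [List.foldl_cons, hj, ih (fun x hx => h x (by simp [hx]))]

-- the inner loop for a fresh row i appends exactly the next free column c'
lemma pvInner (i c c' : Int) (M : List (Int × Int)) (R : List Int)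
    (hi : i ∉ R) (h1 : c ≤ c') (h2 : c' < 8) :
    (PySem.List.pyRange c 8 1).foldl (pvStep i) (M, R, PySem.List.pyRange c c' 1)
      = (M ++ [(i, c')], R ++ [i], PySem.List.pyRange c (c' + 1) 1) := by
  rw [PySem.List.pyRange_one_append c c' 8 h1 (by omega), List.foldl_append]
  rw [pvStep_cols i _ _ (fun j hj => hj)]
  rw [PySem.List.pyRange_one_cons (by omega : c' < 8), List.foldl_cons]
  have hstep : pvStep i (M, R, PySem.List.pyRange c c' 1) c'
      = (M ++ [(i, c')], R ++ [i], PySem.List.pyRange c c' 1 ++ [c']) := by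
    have hc' : c' ∉ PySem.List.pyRange c c' 1 := by
      simp [PySem.List.mem_pyRange_one]
    simp [pvStep, hi, hc']
  rw [hstep, pvStep_done i _ _ (by simp)]
  rw [PySem.List.pyRange_one_succ_right h1]

-- the outer loop invariant: after the rows below a, the state is the diagonal of length s
lemma pvOuter (r c : Int) : ∀ (n : Nat) (a s : Int), a = 8 - (n : Int) → r ≤ a → c < 8 →
    s = min (a - r) (8 - c) →
    (PySem.List.pyRange a 8 1).foldl
      (fun st i => (PySem.List.pyRange c 8 1).foldl (pvStep i) st)
      (pvDiag r c s, PySem.List.pyRange r (r + s) 1, PySem.List.pyRange c (c + s) 1)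
    = (pvDiag r c (min (8 - r) (8 - c)), PySem.List.pyRange r (r + min (8 - r) (8 - c)) 1,
       PySem.List.pyRange c (c + min (8 - r) (8 - c)) 1) := by
  intro n
  induction n with
  | zero =>
      intro a s ha hr hc hs
      have ha8 : a = 8 := by omega
      have hsm : s = min (8 - r) (8 - c) := by omega
      subst ha8 hsm
      rw [show PySem.List.pyRange (8:Int) 8 1 = [] from PySem.List.pyRange_one_eq_nil le_rfl]
      rfl
  | succ n ih =>
      intro a s ha hr hc hs
      have ha8 : a < 8 := by omega
      have hs0 : 0 ≤ s := by omega
      rw [PySem.List.pyRange_one_cons ha8, List.foldl_cons]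
      by_cases hcs : c + s < 8
      · -- row a gets the square (a, c+s)
        have hsa : s = a - r := by omega
        have hfresh : a ∉ PySem.List.pyRange r (r + s) 1 := by
          simp [PySem.List.mem_pyRange_one]; omega
        rw [pvInner a c (c + s) _ _ hfresh (by omega) hcs]
        have hD : pvDiag r c s ++ [(a, c + s)] = pvDiag r c (s + 1) := by
          unfold pvDiag
          rw [PySem.List.pyRange_one_succ_right hs0, List.map_append]
          simp; omega
        have hR : PySem.List.pyRange r (r + s) 1 ++ [a] = PySem.List.pyRange r (r + s + 1) 1 := by
          have := PySem.List.pyRange_one_succ_right (a := r) (b := r + s) (by omega)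
          rw [this]; simp; omega
        rw [hD, hR]
        have := ih (a + 1) (s + 1) (by omega) (by omega) hc (by omega)
        have harr : c + s + 1 = c + (s + 1) := by omega
        rw [harr]
        have hrr : r + s + 1 = r + (s + 1) := by omega
        rw [hrr]
        exact this
      · -- columns exhausted: row a contributes nothing
        have hcs8 : c + s = 8 := by omega
        rw [pvStep_cols a _ _ (by rw [hcs8]; exact fun j hj => hj)]
        exact ih (a + 1) s (by omega) (by omega) hc (by omega)

lemma pvDiag_nodup (r c t : Int) : (PySem.List.pyRange 1 t 1).map
    (fun k => (r + k, c + k)) |>.Nodup := by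
  refine List.Nodup.map ?_ (PySem.List.nodup_pyRange_one _ _)
  intro a b hab
  simpa using congrArg Prod.fst hab

-- ===== VERDICT (by name: the statement is the Claim_ definition above) =====
theorem possibleMovesRightDown_spec : Claim_equal_possibleMovesRightDown := by
  intro r c _
  unfold Spec_possibleMovesRightDown possibleMovesRightDown possibleMovesRightDown_alt
  by_cases hc : c < 8
  · by_cases hr : r < 8
    · -- both on/left-above the board: the diagonal is nonempty after including (r,c)
      have hm1 : 1 ≤ min (8 - r) (8 - c) := by omega
      have hinit := pvOuter r c (8 - r).toNat r 0 (by omega) (by omega) hc (by omega)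
      have hD0 : pvDiag r c 0 = [] := by
        unfold pvDiag; rw [PySem.List.pyRange_one_eq_nil (by omega)]; rfl
      have hR0 : PySem.List.pyRange r (r + 0) 1 = [] :=
        PySem.List.pyRange_one_eq_nil (by omega)
      have hC0 : PySem.List.pyRange c (c + 0) 1 = [] :=
        PySem.List.pyRange_one_eq_nil (by omega)
      rw [hD0, hR0, hC0] at hinit
      simp only [hinit]
      have hDm : pvDiag r c (min (8 - r) (8 - c))
          = (r, c) :: (PySem.List.pyRange 1 (min (8 - r) (8 - c)) 1).map (fun k => (r + k, c + k)) := by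
        unfold pvDiag
        rw [PySem.List.pyRange_one_cons (by omega : (0:Int) < min (8 - r) (8 - c))]
        simp
      have hmem : (r, c) ∈ pvDiag r c (min (8 - r) (8 - c)) := by
        rw [hDm]; exact List.mem_cons_self
      rw [if_pos hmem, hDm, PySem.List.remove?_cons_self, Option.getD_some]
      rw [PySem.Set.ofList_eq_self_of_nodup _ (pvDiag_nodup r c _)]
      have hn : min (7 - r) (7 - c) + 1 = min (8 - r) (8 - c) := by omega
      rw [hn]
    · -- r ≥ 8: no rows at all
      have h1 : PySem.List.pyRange r 8 1 = [] := PySem.List.pyRange_one_eq_nil (by omega)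
      have h2 : PySem.List.pyRange 1 (min (7 - r) (7 - c) + 1) 1 = [] :=
        PySem.List.pyRange_one_eq_nil (by omega)
      simp [h1, h2]
  · -- c ≥ 8: the inner loop is empty for every row
    have hnil : PySem.List.pyRange c 8 1 = [] :=
      PySem.List.pyRange_one_eq_nil (by omega)
    have h2 : PySem.List.pyRange 1 (min (7 - r) (7 - c) + 1) 1 = [] :=
      PySem.List.pyRange_one_eq_nil (by omega)
    simp [hnil, h2]
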